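-- pv_equiv track=rewrite | github.com/twoertwein/MultimodalResidualOptimization | train.py | get_modalities
-- ===== SOURCE A (Python) =====
-- def get_modalities(xs: list[str]) -> dict[str, list[str]]:
--     return {
--         "vision": [
--             x
--             for x in xs
--             if x.startswith("openface")
--             or x == "duchenne_smile_ratio"
--             or x.startswith("detr")
--             or x.startswith("resnet")
--             or x.startswith("afar")
--         ],
--         "acoustic": [
--             x
--             for x in xs
--             if x.startswith("opensmile")
--             or x.startswith("covarep")
--             or x.startswith("volume")
--         ],
--         "language": [x for x in xs if x.startswith("roberta") or x.startswith("liwc")],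
--     }
-- ===== SOURCE B (Python) =====
-- def get_modalities(xs: list[str]) -> dict[str, list[str]]:
--     # Single forward pass: classify each string once into one of three buckets
--     # (the prefix sets are disjoint), instead of scanning xs three times.
--     result = {"vision": [], "acoustic": [], "language": []}
--     for x in xs:
--         if (
--             x.startswith("openface")
--             or x == "duchenne_smile_ratio"
--             or x.startswith("detr")
--             or x.startswith("resnet")
--             or x.startswith("afar")
--         ):
--             result["vision"].append(x)
--         elif x.startswith("opensmile") or x.startswith("covarep") or x.startswith("volume"):
--             result["acoustic"].append(x)
--         elif x.startswith("roberta") or x.startswith("liwc"):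
--             result["language"].append(x)
--     return result
-- ===== Notes on version B (the rewrite author's own statement) =====
-- stated objective: alternative
-- what changed: Replaces A's three separate list-comprehension scans of xs with one dict of empty buckets and a single forward pass that classifies each string once via an if/elif chain over the disjoint prefix sets.
import Mathlib
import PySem

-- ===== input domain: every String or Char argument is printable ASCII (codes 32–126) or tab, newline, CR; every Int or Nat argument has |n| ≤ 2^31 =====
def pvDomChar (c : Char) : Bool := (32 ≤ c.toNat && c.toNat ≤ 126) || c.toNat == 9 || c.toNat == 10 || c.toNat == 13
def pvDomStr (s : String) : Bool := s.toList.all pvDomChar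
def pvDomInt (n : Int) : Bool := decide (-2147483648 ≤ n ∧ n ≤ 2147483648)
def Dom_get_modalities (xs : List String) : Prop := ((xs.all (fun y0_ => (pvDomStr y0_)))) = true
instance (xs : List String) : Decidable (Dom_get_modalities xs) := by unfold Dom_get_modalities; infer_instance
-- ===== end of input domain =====

-- B builds the three buckets in one forward pass over xs (if/elif chain on the
-- disjoint prefix sets) instead of A's three separate comprehension scans.

-- ===== PORT A =====
-- A: dict literal of three list comprehensions, each a full scan of xs.
def get_modalities (xs : List String) : List (String × List String) :=
  [("vision", xs.filter (fun x =>
      PySem.Str.startswith x "openface"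
      || (x == "duchenne_smile_ratio")
      || PySem.Str.startswith x "detr"
      || PySem.Str.startswith x "resnet"
      || PySem.Str.startswith x "afar")),
   ("acoustic", xs.filter (fun x =>
      PySem.Str.startswith x "opensmile"
      || PySem.Str.startswith x "covarep"
      || PySem.Str.startswith x "volume")),
   ("language", xs.filter (fun x =>
      PySem.Str.startswith x "roberta"
      || PySem.Str.startswith x "liwc"))]

-- ===== PORT B =====
-- B-side helpers: the three branch tests of the if/elif chain.
def pvVis (x : String) : Bool :=
  PySem.Str.startswith x "openface"
  || (x == "duchenne_smile_ratio")
  || PySem.Str.startswith x "detr"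
  || PySem.Str.startswith x "resnet"
  || PySem.Str.startswith x "afar"

def pvAco (x : String) : Bool :=
  PySem.Str.startswith x "opensmile"
  || PySem.Str.startswith x "covarep"
  || PySem.Str.startswith x "volume"

def pvLan (x : String) : Bool :=
  PySem.Str.startswith x "roberta" || PySem.Str.startswith x "liwc"

-- the single classification loop over xs, appending to the matching bucket
def pvLoop (xs : List String) (v a l : List String) :
    List String × List String × List String :=
  match xs with
  | [] => (v, a, l)
  | x :: rest =>
    if pvVis x then pvLoop rest (v ++ [x]) a l
    else if pvAco x then pvLoop rest v (a ++ [x]) l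
    else if pvLan x then pvLoop rest v a (l ++ [x])
    else pvLoop rest v a l

def get_modalities_alt (xs : List String) : List (String × List String) :=
  match pvLoop xs [] [] [] with
  | (v, a, l) => [("vision", v), ("acoustic", a), ("language", l)]

-- ===== PRECONDITION & SPEC =====
def Spec_get_modalities (xs : List String) (out : List (String × List String)) : Prop := out = get_modalities_alt xs
instance (xs : List String) (out : List (String × List String)) : Decidable (Spec_get_modalities xs out) := by unfold Spec_get_modalities; infer_instance

-- ===== CLAIM (what is proved, stated in full; the proofs are below) =====
def Claim_equal_get_modalities : Prop := ∀ (xs : List String), Dom_get_modalities xs → Spec_get_modalities xs (get_modalities xs)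

-- ===== LEMMAS AND PROOFS =====

-- two incomparable lists cannot both be prefixes of the same list
theorem pvPrefAbsurd {p q l : List Char} (hp : p <+: l) (hq : q <+: l)
    (h1 : ¬ p <+: q) (h2 : ¬ q <+: p) : False := by
  rcases List.prefix_or_prefix_of_prefix hp hq with h | h <;> contradiction

theorem pvAcoNotVis (x : String) (h : pvAco x = true) : pvVis x = false := by
  rw [Bool.eq_false_iff]
  intro hv
  simp only [pvAco, pvVis, Bool.or_eq_true, PySem.Str.startswith_eq,
    PySem.Chars.startswith_iff, beq_iff_eq] at h hv
  rcases h with (h | h) | h <;> rcases hv with (((hv | hv) | hv) | hv) | hv <;>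
    first
      | (subst hv; exact absurd h (by decide))
      | exact pvPrefAbsurd hv h (by decide) (by decide)

theorem pvLanNotVis (x : String) (h : pvLan x = true) : pvVis x = false := by
  rw [Bool.eq_false_iff]
  intro hv
  simp only [pvLan, pvVis, Bool.or_eq_true, PySem.Str.startswith_eq,
    PySem.Chars.startswith_iff, beq_iff_eq] at h hv
  rcases h with h | h <;> rcases hv with (((hv | hv) | hv) | hv) | hv <;>
    first
      | (subst hv; exact absurd h (by decide))
      | exact pvPrefAbsurd hv h (by decide) (by decide)

theorem pvLanNotAco (x : String) (h : pvLan x = true) : pvAco x = false := by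
  rw [Bool.eq_false_iff]
  intro ha
  simp only [pvLan, pvAco, Bool.or_eq_true, PySem.Str.startswith_eq,
    PySem.Chars.startswith_iff] at h ha
  rcases h with h | h <;> rcases ha with (ha | ha) | ha <;>
    exact pvPrefAbsurd ha h (by decide) (by decide)

theorem pvLoop_eq (xs v a l) : pvLoop xs v a l =
    (v ++ xs.filter pvVis,
     a ++ xs.filter (fun x => !pvVis x && pvAco x),
     l ++ xs.filter (fun x => !pvVis x && !pvAco x && pvLan x)) := by
  induction xs generalizing v a l with
  | nil => simp [pvLoop]
  | cons x rest ih =>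
    simp only [pvLoop]
    split_ifs with h1 h2 h3 <;>
      simp [ih, *]

theorem pvFilterAco (xs : List String) :
    xs.filter (fun x => !pvVis x && pvAco x) = xs.filter pvAco := by
  apply List.filter_congr
  intro x _
  cases ha : pvAco x
  · simp
  · simp [pvAcoNotVis x ha]

theorem pvFilterLan (xs : List String) :
    xs.filter (fun x => !pvVis x && !pvAco x && pvLan x) = xs.filter pvLan := by
  apply List.filter_congr
  intro x _
  cases hl : pvLan x
  · simp
  · simp [pvLanNotVis x hl, pvLanNotAco x hl]

-- ===== VERDICT (by name: the statement is the Claim_ definition above) =====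
theorem get_modalities_spec : Claim_equal_get_modalities := by
  intro xs _
  unfold Spec_get_modalities get_modalities get_modalities_alt
  rw [pvLoop_eq, pvFilterAco, pvFilterLan]
  rfl
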